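-- pv_equiv track=rewrite | github.com/kcharlan/utilities | md-json/md_converter.py | get_full_account_name_recursive
-- ===== SOURCE A (Python) =====
-- def get_full_account_name_recursive(account_id, raw_accounts_data, recursion_cache):
--     """
--     Recursively constructs the true full hierarchical account name.
--     """
--     if account_id in recursion_cache:
--         return recursion_cache[account_id]
--
--     account_item = raw_accounts_data.get(account_id)
--     if not account_item:
--         full_name = f"Unknown_Account_ID_{account_id}"
--         recursion_cache[account_id] = full_name
--         return full_name
--
--     current_name = account_item.get("name", "Unnamed Account")
--     parent_id = account_item.get("parentid")
--
--     if parent_id and parent_id in raw_accounts_data and parent_id != account_id: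
--         parent_full_name = get_full_account_name_recursive(parent_id, raw_accounts_data, recursion_cache)
--         if not parent_full_name.startswith("Unknown_Account_ID_"):
--             full_name = f"{parent_full_name}:{current_name}"
--         else:
--             full_name = current_name
--     else:
--         full_name = current_name
--
--     recursion_cache[account_id] = full_name
--     return full_name
-- ===== SOURCE B (Python) =====
-- def get_full_account_name_recursive(account_id, raw_accounts_data, recursion_cache):
--     """
--     Iterative re-implementation: walk the parentid chain upward collecting the
--     ids that need a parent-qualified name, then fold the names back downward.
--     Mutates recursion_cache exactly as the recursive version does (under the
--     precondition that the parent chain is cycle-free; on a cyclic chain the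
--     recursive version raises RecursionError, this one stops after
--     len(raw_accounts_data) + 1 steps).
--     """
--     chain = []
--     base = ""
--     cur = account_id
--     for _ in range(len(raw_accounts_data) + 1):
--         if cur in recursion_cache:
--             base = recursion_cache[cur]
--             break
--         item = raw_accounts_data.get(cur)
--         if not item:
--             base = "Unknown_Account_ID_" + cur
--             recursion_cache[cur] = base
--             break
--         pid = item.get("parentid")
--         if pid and pid in raw_accounts_data and pid != cur:
--             chain.append(cur)
--             cur = pid
--         else:
--             base = item.get("name", "Unnamed Account")
--             recursion_cache[cur] = base
--             break
--     full = base
--     for cid in reversed(chain):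
--         nm = raw_accounts_data[cid].get("name", "Unnamed Account")
--         full = nm if full.startswith("Unknown_Account_ID_") else full + ":" + nm
--         recursion_cache[cid] = full
--     return full
-- ===== Notes on version B (the rewrite author's own statement) =====
-- stated objective: alternative
-- what changed: Replaces A's recursion with an explicit two-phase iteration: an upward walk that collects the parentid chain (bounded by len(raw_accounts_data)+1 loop iterations, so cycles cannot loop forever), followed by a downward fold that builds each full name; cache reads/writes are unchanged.
import Mathlib
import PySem

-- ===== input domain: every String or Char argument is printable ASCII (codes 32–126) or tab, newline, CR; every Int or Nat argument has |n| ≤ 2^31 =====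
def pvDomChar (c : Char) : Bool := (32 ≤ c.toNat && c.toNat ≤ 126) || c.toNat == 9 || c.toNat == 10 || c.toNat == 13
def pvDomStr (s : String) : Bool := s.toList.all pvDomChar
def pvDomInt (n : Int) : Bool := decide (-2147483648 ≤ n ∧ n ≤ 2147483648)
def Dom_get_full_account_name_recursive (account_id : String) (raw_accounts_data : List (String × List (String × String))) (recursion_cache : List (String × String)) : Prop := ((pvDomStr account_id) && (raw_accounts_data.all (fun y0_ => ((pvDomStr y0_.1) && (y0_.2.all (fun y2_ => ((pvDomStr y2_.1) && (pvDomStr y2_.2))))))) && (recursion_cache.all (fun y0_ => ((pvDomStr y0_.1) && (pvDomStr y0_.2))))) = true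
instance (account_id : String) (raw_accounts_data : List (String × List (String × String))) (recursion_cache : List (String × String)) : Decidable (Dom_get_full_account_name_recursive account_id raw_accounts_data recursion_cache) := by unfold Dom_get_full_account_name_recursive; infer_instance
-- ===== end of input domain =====

-- B replaces A's recursion by an explicit upward walk that collects the parent chain and a
-- downward fold that builds the names (objective: alternative decomposition, same cost).
-- Both programs mutate recursion_cache identically under Pre_; the theorems below are about
-- the RETURN value only.

-- ===== PORT A =====
-- dict lookup (first match) on the association lists
def pvLookupA (d : List (String × List (String × String))) (k : String) : Option (List (String × String)) :=
  (PySem.Dict.mk d).get? k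

def pvLookupS (d : List (String × String)) (k : String) : Option String :=
  (PySem.Dict.mk d).get? k

-- literal transliteration of A's recursion; the fuel counts recursion depth (Python has no
-- fuel: it raises RecursionError on a cyclic parent chain — exactly the `none` result,
-- excluded by Pre_; fuel |data|+1 suffices for every terminating chain).
def goA (raw_accounts_data : List (String × List (String × String))) (recursion_cache : List (String × String)) : Nat → String → Option String
  | 0, _ => none
  | fuel + 1, account_id =>
    match pvLookupS recursion_cache account_id with
    | some v => some v                                   -- if account_id in recursion_cache
    | none =>
      match pvLookupA raw_accounts_data account_id with
      | none => some ("Unknown_Account_ID_" ++ account_id)       -- account_item is None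
      | some account_item =>
        if account_item = [] then some ("Unknown_Account_ID_" ++ account_id)  -- empty dict is falsy
        else
          let current_name := PySem.Dict.getD (PySem.Dict.mk account_item) "name" "Unnamed Account"
          match pvLookupS account_item "parentid" with
          | some parent_id =>
            if parent_id ≠ "" ∧ (pvLookupA raw_accounts_data parent_id).isSome ∧ parent_id ≠ account_id then
              (goA raw_accounts_data recursion_cache fuel parent_id).map (fun parent_full_name =>
                if PySem.Str.startswith parent_full_name "Unknown_Account_ID_" then current_name
                else parent_full_name ++ ":" ++ current_name)
            else some current_name
          | none => some current_name

def get_full_account_name_recursive (account_id : String) (raw_accounts_data : List (String × List (String × String))) (recursion_cache : List (String × String)) : String :=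
  (goA raw_accounts_data recursion_cache (raw_accounts_data.length + 1) account_id).getD ""

-- ===== PORT B =====
-- name of an account id (phase 2 of Source B)
def nameOfB (raw_accounts_data : List (String × List (String × String))) (cid : String) : String :=
  PySem.Dict.getD (PySem.Dict.mk ((pvLookupA raw_accounts_data cid).getD [])) "name" "Unnamed Account"

def combineB (raw_accounts_data : List (String × List (String × String))) (full : String) (cid : String) : String :=
  let nm := nameOfB raw_accounts_data cid
  if PySem.Str.startswith full "Unknown_Account_ID_" then nm else full ++ ":" ++ nm

-- the upward walk of Source B's for-loop: fuel = len(raw_accounts_data)+1 is exactly the range bound;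
-- returns (chain, base); fuel running out = the loop exhausting its range (base stays "")
def walkB (raw_accounts_data : List (String × List (String × String))) (recursion_cache : List (String × String)) : Nat → List String → String → List String × String
  | 0, chain, _ => (chain, "")
  | fuel + 1, chain, cur =>
    match pvLookupS recursion_cache cur with
    | some v => (chain, v)
    | none =>
      match pvLookupA raw_accounts_data cur with
      | none => (chain, "Unknown_Account_ID_" ++ cur)
      | some item =>
        if item = [] then (chain, "Unknown_Account_ID_" ++ cur)
        else
          match pvLookupS item "parentid" with
          | some pid =>
            if pid ≠ "" ∧ (pvLookupA raw_accounts_data pid).isSome ∧ pid ≠ cur then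
              walkB raw_accounts_data recursion_cache fuel (chain ++ [cur]) pid
            else (chain, PySem.Dict.getD (PySem.Dict.mk item) "name" "Unnamed Account")
          | none => (chain, PySem.Dict.getD (PySem.Dict.mk item) "name" "Unnamed Account")

def get_full_account_name_recursive_alt (account_id : String) (raw_accounts_data : List (String × List (String × String))) (recursion_cache : List (String × String)) : String :=
  let w := walkB raw_accounts_data recursion_cache (raw_accounts_data.length + 1) [] account_id
  w.1.reverse.foldl (combineB raw_accounts_data) w.2

-- ===== PRECONDITION & SPEC =====
-- one step of the parent-pointer graph of the INPUT (cut by the cache): the id the walk moves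
-- to, or none at a terminal; used only by Pre_
def pvStep (raw_accounts_data : List (String × List (String × String))) (recursion_cache : List (String × String)) (cur : String) : Option String :=
  match pvLookupS recursion_cache cur with
  | some _ => none
  | none =>
    match pvLookupA raw_accounts_data cur with
    | none => none
    | some item =>
      if item = [] then none
      else
        match pvLookupS item "parentid" with
        | some pid =>
          if pid ≠ "" ∧ (pvLookupA raw_accounts_data pid).isSome ∧ pid ≠ cur then some pid else none
        | none => none

def pvChainStops (raw_accounts_data : List (String × List (String × String))) (recursion_cache : List (String × String)) : Nat → String → Bool
  | 0, _ => false
  | k + 1, cur =>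
    match pvStep raw_accounts_data recursion_cache cur with
    | none => true
    | some p => pvChainStops raw_accounts_data recursion_cache k p

-- Pre_: the parentid chain from account_id (cut by the cache) reaches a terminal, i.e. it is
-- cycle-free; any terminating chain stops within |data|+1 steps. On the excluded inputs Python A
-- terminates never: it raises RecursionError, so A returns no value there.
def Pre_get_full_account_name_recursive (account_id : String) (raw_accounts_data : List (String × List (String × String))) (recursion_cache : List (String × String)) : Prop :=
  pvChainStops raw_accounts_data recursion_cache (raw_accounts_data.length + 1) account_id = true

instance (account_id : String) (raw_accounts_data : List (String × List (String × String))) (recursion_cache : List (String × String)) : Decidable (Pre_get_full_account_name_recursive account_id raw_accounts_data recursion_cache) := by unfold Pre_get_full_account_name_recursive; infer_instance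

def pvWitness_get_full_account_name_recursive : String × (List (String × List (String × String))) × (List (String × String)) :=
  ("a", [("a", [("name", "Assets"), ("parentid", "r")]), ("r", [("name", "Root")])], [])

def Spec_get_full_account_name_recursive (account_id : String) (raw_accounts_data : List (String × List (String × String))) (recursion_cache : List (String × String)) (out : String) : Prop := out = get_full_account_name_recursive_alt account_id raw_accounts_data recursion_cache
instance (account_id : String) (raw_accounts_data : List (String × List (String × String))) (recursion_cache : List (String × String)) (out : String) : Decidable (Spec_get_full_account_name_recursive account_id raw_accounts_data recursion_cache out) := by unfold Spec_get_full_account_name_recursive; infer_instance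

-- ===== CLAIM (what is proved, stated in full; the proofs are below) =====
def Claim_equal_get_full_account_name_recursive : Prop := ∀ (account_id : String) (raw_accounts_data : List (String × List (String × String))) (recursion_cache : List (String × String)), Dom_get_full_account_name_recursive account_id raw_accounts_data recursion_cache → Pre_get_full_account_name_recursive account_id raw_accounts_data recursion_cache → Spec_get_full_account_name_recursive account_id raw_accounts_data recursion_cache (get_full_account_name_recursive account_id raw_accounts_data recursion_cache)

-- ===== LEMMAS AND PROOFS =====

-- the one real lemma: wherever the chain stops within k steps, A's recursion with fuel k
-- returns exactly the fold of B's walk with fuel k (for every incoming chain accumulator)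
theorem goA_eq_walkB (raw_accounts_data : List (String × List (String × String))) (recursion_cache : List (String × String)) :
    ∀ (k : Nat) (cur : String),
      pvChainStops raw_accounts_data recursion_cache k cur = true →
      ∀ chain : List String,
        ∃ t b, walkB raw_accounts_data recursion_cache k chain cur = (chain ++ t, b) ∧
          goA raw_accounts_data recursion_cache k cur =
            some (t.reverse.foldl (combineB raw_accounts_data) b) := by
  intro k
  induction k with
  | zero => intro cur h; simp [pvChainStops] at h
  | succ k ih =>
    intro cur h chain
    simp only [pvChainStops] at h
    cases hc : pvLookupS recursion_cache cur with
    | some v =>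
      exact ⟨[], v, by simp [walkB, hc], by simp [goA, hc]⟩
    | none =>
      cases hd : pvLookupA raw_accounts_data cur with
      | none =>
        exact ⟨[], "Unknown_Account_ID_" ++ cur, by simp [walkB, hc, hd], by simp [goA, hc, hd]⟩
      | some item =>
        by_cases hi : item = []
        · exact ⟨[], "Unknown_Account_ID_" ++ cur, by simp [walkB, hc, hd, hi],
            by simp [goA, hc, hd, hi]⟩
        · cases hp : pvLookupS item "parentid" with
          | none =>
            exact ⟨[], PySem.Dict.getD (PySem.Dict.mk item) "name" "Unnamed Account",
              by simp [walkB, hc, hd, hi, hp], by simp [goA, hc, hd, hi, hp]⟩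
          | some pid =>
            by_cases hcond : pid ≠ "" ∧ (pvLookupA raw_accounts_data pid).isSome ∧ pid ≠ cur
            · have h' : pvChainStops raw_accounts_data recursion_cache k pid = true := by
                simpa [pvStep, hc, hd, hi, hp, hcond] using h
              obtain ⟨t, b, hw, hg⟩ := ih pid h' (chain ++ [cur])
              refine ⟨cur :: t, b, ?_, ?_⟩
              · simp [walkB, hc, hd, hi, hp, hcond, hw]
              · simp [goA, hc, hd, hi, hp, hcond, hg, List.foldl_append, combineB, nameOfB]
            · exact ⟨[], PySem.Dict.getD (PySem.Dict.mk item) "name" "Unnamed Account",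
                by simp [walkB, hc, hd, hi, hp, hcond], by simp [goA, hc, hd, hi, hp, hcond]⟩

-- ===== VERDICT (by name: the statement is the Claim_ definition above) =====
theorem get_full_account_name_recursive_spec : Claim_equal_get_full_account_name_recursive := by
  intro account_id raw_accounts_data recursion_cache _ hpre
  unfold Spec_get_full_account_name_recursive
  obtain ⟨t, b, hw, hg⟩ := goA_eq_walkB raw_accounts_data recursion_cache
    (raw_accounts_data.length + 1) account_id hpre []
  unfold get_full_account_name_recursive get_full_account_name_recursive_alt
  rw [hg, hw]
  rfl
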